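-- pv_equiv track=rewrite | github.com/Zikx/Algorithm | Baekjoon/Greedy/1이될때까지.py | solution
-- ===== SOURCE A (Python) =====
-- def solution(n, k):
--     cnt = 0
--     while n != 1:
--         if n % k == 0:
--             n //= k
--             cnt += 1
--         else:
--             n -= 1
--             cnt += 1
--     return cnt
-- ===== SOURCE B (Python) =====
-- def solution(n, k):
--     # Closed formula over the base-k representation of n:
--     # every digit contributes its value in unit subtractions, every digit
--     # boundary one division, and the leading digit its own subtractions,
--     # giving sum(digits) + len(digits) - 2. O(log_k n).
--     def digits(m):
--         return [] if m == 0 else [m % k] + digits(m // k)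
--     ds = digits(n)
--     return sum(ds) + len(ds) - 2
-- ===== Notes on version B (the rewrite author's own statement) =====
-- stated objective: faster
-- what changed: Replaces the one-step-at-a-time loop by building the base-k digit list of n once and returning the closed formula sum(digits) + len(digits) - 2.
-- outside the precondition, e.g. on solution(1, 0): A returns 0, B raises ZeroDivisionError; on solution(2, -5): A returns 1, B returns -4
import Mathlib
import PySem

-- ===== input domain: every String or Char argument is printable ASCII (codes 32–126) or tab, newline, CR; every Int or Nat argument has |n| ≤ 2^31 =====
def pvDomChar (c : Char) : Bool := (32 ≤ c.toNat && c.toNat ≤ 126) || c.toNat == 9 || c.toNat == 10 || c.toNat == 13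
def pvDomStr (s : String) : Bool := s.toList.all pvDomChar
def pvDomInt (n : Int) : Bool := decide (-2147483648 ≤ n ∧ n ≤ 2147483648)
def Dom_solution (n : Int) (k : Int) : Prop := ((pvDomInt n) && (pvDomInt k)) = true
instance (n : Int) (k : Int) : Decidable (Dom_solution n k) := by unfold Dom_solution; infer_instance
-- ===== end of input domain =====

-- B builds the base-k digit list of n once and returns sum(digits) + len(digits) - 2 (O(log_k n) instead of O(n)).


-- ===== PORT A =====
-- A's while-loop as fuel recursion; inside Pre_ the loop runs at most n-1 times, so fuel n.toNat is never exhausted.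
def solutionGo : Nat → Int → Int → Int → Int
  | 0, _, _, cnt => cnt
  | fuel + 1, n, k, cnt =>
    if n ≠ 1 then
      if PySem.Int.mod n k = 0 then solutionGo fuel (PySem.Int.floordiv n k) k (cnt + 1)
      else solutionGo fuel (n - 1) k (cnt + 1)
    else cnt

def solution (n : Int) (k : Int) : Int := solutionGo n.toNat n k 0

-- ===== PORT B =====
-- B's recursive digit extraction; inside Pre_ the recursion depth is at most n, so fuel n.toNat suffices.
def solutionDigits : Nat → Int → Int → List Int
  | 0, _, _ => []
  | fuel + 1, m, k =>
    if m = 0 then [] else PySem.Int.mod m k :: solutionDigits fuel (PySem.Int.floordiv m k) k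

def solution_alt (n : Int) (k : Int) : Int :=
  let ds := solutionDigits n.toNat n k
  ds.sum + (ds.length : Int) - 2

-- ===== PRECONDITION & SPEC =====
-- Pre_ excludes k ≤ 1 and n ≤ 0: there A raises ZeroDivisionError (k = 0) or loops forever on almost
-- every input, and on the few such inputs where A still returns (n = 1 with k ≤ 1, or a negative k
-- hitting no multiple before 1) B's digit expansion raises, diverges or yields a meaningless value.
def Pre_solution (n : Int) (k : Int) : Prop := 1 ≤ n ∧ 2 ≤ k
instance (n : Int) (k : Int) : Decidable (Pre_solution n k) := by unfold Pre_solution; infer_instance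
def pvWitness_solution : Int × Int := (10, 3)

def Spec_solution (n : Int) (k : Int) (out : Int) : Prop := out = solution_alt n k
instance (n : Int) (k : Int) (out : Int) : Decidable (Spec_solution n k out) := by unfold Spec_solution; infer_instance

-- ===== CLAIM (what is proved, stated in full; the proofs are below) =====
def Claim_equal_solution : Prop := ∀ (n : Int) (k : Int), Dom_solution n k → Pre_solution n k → Spec_solution n k (solution n k)

-- ===== LEMMAS AND PROOFS =====

-- a positive dividend strictly shrinks under division by k ≥ 2
lemma ediv_lt (a b : Int) (ha : 0 < a) (hb : 1 < b) : a / b < a := by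
  have h1 := Int.mul_ediv_add_emod a b
  have := Int.emod_nonneg a (show b ≠ 0 by omega)
  have h3 := Int.emod_lt_of_pos a (show 0 < b by omega)
  nlinarith [Int.ediv_nonneg (show (0:Int) ≤ a by omega) (show (0:Int) ≤ b by omega)]

-- the abstract step count, by well-founded recursion on n.toNat
def steps (n k : Int) : Int :=
  if h : 1 < n ∧ 2 ≤ k then
    if PySem.Int.mod n k = 0 then 1 + steps (PySem.Int.floordiv n k) k
    else 1 + steps (n - 1) k
  else 0
termination_by n.toNat
decreasing_by
  · have hdiv : PySem.Int.floordiv n k = n / k := PySem.Int.floordiv_eq_ediv_of_pos (by omega)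
    have h1 : n / k < n := ediv_lt n k (by omega) (by omega)
    have h2 : 0 ≤ n / k := Int.ediv_nonneg (by omega) (by omega)
    rw [hdiv]; omega
  · omega

lemma steps_base {n k : Int} (h : ¬ (1 < n ∧ 2 ≤ k)) : steps n k = 0 := by
  rw [steps]; simp [h]

lemma mod_emod {n k : Int} (hk : 2 ≤ k) : PySem.Int.mod n k = n % k :=
  PySem.Int.mod_eq_emod_of_pos (by omega)

lemma fd_ediv {n k : Int} (hk : 2 ≤ k) : PySem.Int.floordiv n k = n / k :=
  PySem.Int.floordiv_eq_ediv_of_pos (by omega)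

lemma steps_div {n k : Int} (hn : 1 < n) (hk : 2 ≤ k) (hm : n % k = 0) :
    steps n k = 1 + steps (n / k) k := by
  rw [steps]; simp [hn, hk, mod_emod hk, fd_ediv hk, hm]

lemma steps_sub {n k : Int} (hn : 1 < n) (hk : 2 ≤ k) (hm : n % k ≠ 0) :
    steps n k = 1 + steps (n - 1) k := by
  rw [steps]; simp [hn, hk, mod_emod hk, hm]

-- below k, steps is just n - 1 unit subtractions
lemma steps_small : ∀ (m : Nat) (n k : Int), 1 ≤ n → n ≤ m → 2 ≤ k → n < k → steps n k = n - 1 := by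
  intro m
  induction m with
  | zero => intro n k h1 h2 _ _; omega
  | succ m ih =>
    intro n k h1 h2 hk hnk
    by_cases hn : 1 < n
    · have hm : n % k ≠ 0 := by
        rw [Int.emod_eq_of_lt (by omega) hnk]; omega
      rw [steps_sub hn hk hm, ih (n-1) k (by omega) (by omega) hk (by omega)]; ring
    · have : n = 1 := by omega
      subst this; rw [steps_base (by omega)]; ring

-- one division batches n % k unit subtractions plus the division itself
lemma steps_batch : ∀ (r : Nat) (n k : Int), 2 ≤ k → k ≤ n → n % k = r →
    steps n k = n % k + 1 + steps (n / k) k := by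
  intro r
  induction r with
  | zero =>
    intro n k hk hkn hr
    have hr' : n % k = 0 := by exact_mod_cast hr
    rw [steps_div (by omega) hk hr', hr']; ring
  | succ r ih =>
    intro n k hk hkn hr
    have hr' : n % k = (r : Int) + 1 := by push_cast at hr ⊢; omega
    have hm : n % k ≠ 0 := by omega
    have hrk : n % k < k := Int.emod_lt_of_pos n (by omega)
    have hdm := Int.mul_ediv_add_emod n k
    have hkn1 : k ≤ n - 1 := by nlinarith [show 1 ≤ n / k from by nlinarith [ediv_lt n k (by omega) (by omega), Int.ediv_nonneg (show (0:Int) ≤ n by omega) (show (0:Int) ≤ k by omega)]]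
    have huniq : (n - 1) / k = n / k ∧ (n - 1) % k = n % k - 1 :=
      (Int.ediv_emod_unique (by omega)).mpr ⟨by omega, by omega, by omega⟩
    rw [steps_sub (by omega) hk hm,
        ih (n-1) k hk hkn1 (by rw [huniq.2]; omega), huniq.1, huniq.2, hr']
    ring

-- A's fuel loop computes cnt + steps whenever the fuel covers n
lemma solutionGo_eq : ∀ (f : Nat) (n k cnt : Int), 1 ≤ n → 2 ≤ k → n.toNat ≤ f →
    solutionGo f n k cnt = cnt + steps n k := by
  intro f
  induction f with
  | zero => intro n k cnt h1 _ hf; omega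
  | succ f ih =>
    intro n k cnt h1 hk hf
    by_cases hn : n = 1
    · have h0 : steps n k = 0 := steps_base (by omega)
      subst hn
      simp [solutionGo, h0]
    · have hn1 : 1 < n := by omega
      simp only [solutionGo, if_pos (show n ≠ 1 from hn), mod_emod hk, fd_ediv hk]
      by_cases hm : n % k = 0
      · have hge : k ≤ n := by
          rcases (Int.dvd_iff_emod_eq_zero ..).mpr hm with ⟨c, hc⟩
          have : 1 ≤ c := by nlinarith
          nlinarith
        have hq1 : 1 ≤ n / k := by
          have := Int.mul_ediv_add_emod n k
          have := Int.ediv_nonneg (show (0:Int) ≤ n by omega) (show (0:Int) ≤ k by omega)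
          nlinarith
        have hqlt : n / k < n := ediv_lt n k (by omega) (by omega)
        rw [if_pos hm, ih (n / k) k (cnt + 1) hq1 hk (by omega), steps_div hn1 hk hm]
        ring
      · rw [if_neg hm, ih (n - 1) k (cnt + 1) (by omega) hk (by omega), steps_sub hn1 hk hm]
        ring

-- B's digit list satisfies sum + length = steps + 2 whenever the fuel covers n
lemma digits_sum_len : ∀ (f : Nat) (n k : Int), 1 ≤ n → 2 ≤ k → n.toNat ≤ f →
    (solutionDigits f n k).sum + ((solutionDigits f n k).length : Int) = steps n k + 2 := by
  intro f
  induction f with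
  | zero => intro n k h1 _ hf; omega
  | succ f ih =>
    intro n k h1 hk hf
    simp only [solutionDigits, if_neg (show ¬ n = 0 by omega), mod_emod hk, fd_ediv hk,
      List.sum_cons, List.length_cons]
    by_cases hge : k ≤ n
    · have hq1 : 1 ≤ n / k := by
        have := Int.mul_ediv_add_emod n k
        have := Int.emod_lt_of_pos n (show (0:Int) < k by omega)
        have := Int.ediv_nonneg (show (0:Int) ≤ n by omega) (show (0:Int) ≤ k by omega)
        nlinarith
      have hqlt : n / k < n := ediv_lt n k (by omega) (by omega)
      have hm0 : 0 ≤ n % k := Int.emod_nonneg n (by omega)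
      have hrec := ih (n / k) k hq1 hk (by omega)
      rw [steps_batch (n % k).toNat n k hk hge (by omega)]
      push_cast
      omega
    · -- n < k: one digit [n], quotient 0, recursion returns []
      have hmod : n % k = n := Int.emod_eq_of_lt (by omega) (by omega)
      have hdiv : n / k = 0 := Int.ediv_eq_zero_of_lt (by omega) (by omega)
      have hnil : solutionDigits f 0 k = [] := by cases f <;> simp [solutionDigits]
      rw [hmod, hdiv, hnil, steps_small n.toNat n k h1 (by omega) hk (by omega)]
      simp
      ring

-- ===== VERDICT (by name: the statement is the Claim_ definition above) =====
theorem solution_spec : Claim_equal_solution := by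
  intro n k _ hpre
  obtain ⟨h1, hk⟩ := hpre
  unfold Spec_solution solution solution_alt
  rw [solutionGo_eq n.toNat n k 0 h1 hk (le_refl _)]
  show 0 + steps n k = (solutionDigits n.toNat n k).sum + ((solutionDigits n.toNat n k).length : Int) - 2
  have := digits_sum_len n.toNat n k h1 hk (le_refl _)
  omega
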